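-- pv_equiv track=rewrite | github.com/greenhand011/monthly-dca-signal-bot | src/dca_signal_bot/presentation.py | decision_path_label
-- ===== SOURCE A (Python) =====
-- def decision_path_label(text: str) -> str:
--     replacements = [
--         ("EXTREME_HEAT", "极热"),
--         ("HEAT", "过热"),
--         ("CAPITULATION_RECOVERY", "止跌回升"),
--         ("DEEP_PULLBACK", "深度回撤"),
--         ("PULLBACK", "回撤"),
--         ("NORMAL", "正常执行"),
--         ("TACTICAL_REBALANCE", "资产级调整"),
--         ("BASELINE_ONLY", "维持基线"),
--         ("STRONG_OVERWEIGHT", "明显高配"),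
--         ("STRONG_UNDERWEIGHT", "明显低配"),
--         ("OVERWEIGHT", "适度高配"),
--         ("NEUTRAL", "维持基线"),
--         ("UNDERWEIGHT", "适度低配"),
--         ("YES", "是"),
--         ("NO", "否"),
--     ]
--     result = text
--     for source, target in replacements:
--         result = result.replace(source, target)
--     return result
-- ===== SOURCE B (Python) =====
-- def decision_path_label(text: str) -> str:
--     replacements = [
--         ("EXTREME_HEAT", "极热"),
--         ("HEAT", "过热"),
--         ("CAPITULATION_RECOVERY", "止跌回升"),
--         ("DEEP_PULLBACK", "深度回撤"),
--         ("PULLBACK", "回撤"),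
--         ("NORMAL", "正常执行"),
--         ("TACTICAL_REBALANCE", "资产级调整"),
--         ("BASELINE_ONLY", "维持基线"),
--         ("STRONG_OVERWEIGHT", "明显高配"),
--         ("STRONG_UNDERWEIGHT", "明显低配"),
--         ("OVERWEIGHT", "适度高配"),
--         ("NEUTRAL", "维持基线"),
--         ("UNDERWEIGHT", "适度低配"),
--         ("YES", "是"),
--         ("NO", "否"),
--     ]
--     parts = []
--     i = 0
--     n = len(text)
--     while i < n:
--         for source, target in replacements:
--             if text.startswith(source, i):
--                 parts.append(target)
--                 i += len(source)
--                 break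
--         else:
--             parts.append(text[i])
--             i += 1
--     return "".join(parts)
-- ===== Notes on version B (the rewrite author's own statement) =====
-- stated objective: alternative
-- what changed: B makes a single left-to-right scan over the text, at each position matching the first token in list order and emitting its Chinese label (or the character), instead of A's 15 sequential full-string replace passes.
-- outside the precondition, e.g. on decision_path_label('TACTICAL_REBALANCEXTREME_HEAT'): A returns 'TACTICAL_REBALANC极热', B returns '资产级调整XTREME_过热'
import Mathlib
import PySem

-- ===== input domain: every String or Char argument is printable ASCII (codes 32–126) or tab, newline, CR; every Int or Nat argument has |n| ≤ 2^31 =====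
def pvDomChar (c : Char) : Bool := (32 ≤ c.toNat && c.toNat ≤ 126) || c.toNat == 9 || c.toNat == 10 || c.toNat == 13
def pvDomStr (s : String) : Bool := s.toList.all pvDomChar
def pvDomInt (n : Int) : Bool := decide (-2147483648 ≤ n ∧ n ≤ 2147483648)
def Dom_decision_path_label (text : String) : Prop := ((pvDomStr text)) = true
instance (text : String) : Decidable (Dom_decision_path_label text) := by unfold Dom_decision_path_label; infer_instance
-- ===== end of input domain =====

-- B replaces A's 15 sequential full-string replace passes by ONE left-to-right scan that
-- matches tokens by list priority at each position (objective: alternative, not faster).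

-- ===== PORT A =====
def decision_path_label (text : String) : String :=
  ([("EXTREME_HEAT", "极热"),
    ("HEAT", "过热"),
    ("CAPITULATION_RECOVERY", "止跌回升"),
    ("DEEP_PULLBACK", "深度回撤"),
    ("PULLBACK", "回撤"),
    ("NORMAL", "正常执行"),
    ("TACTICAL_REBALANCE", "资产级调整"),
    ("BASELINE_ONLY", "维持基线"),
    ("STRONG_OVERWEIGHT", "明显高配"),
    ("STRONG_UNDERWEIGHT", "明显低配"),
    ("OVERWEIGHT", "适度高配"),
    ("NEUTRAL", "维持基线"),
    ("UNDERWEIGHT", "适度低配"),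
    ("YES", "是"),
    ("NO", "否")] : List (String × String)).foldl
    (fun result st => PySem.Str.replace result st.1 st.2) text

-- ===== PORT B =====
-- B's replacement table, on code-point lists (Source B scans the string position by position)
def pvReplacements : List (List Char × List Char) :=
  [("EXTREME_HEAT".toList, "极热".toList),
   ("HEAT".toList, "过热".toList),
   ("CAPITULATION_RECOVERY".toList, "止跌回升".toList),
   ("DEEP_PULLBACK".toList, "深度回撤".toList),
   ("PULLBACK".toList, "回撤".toList),
   ("NORMAL".toList, "正常执行".toList),
   ("TACTICAL_REBALANCE".toList, "资产级调整".toList),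
   ("BASELINE_ONLY".toList, "维持基线".toList),
   ("STRONG_OVERWEIGHT".toList, "明显高配".toList),
   ("STRONG_UNDERWEIGHT".toList, "明显低配".toList),
   ("OVERWEIGHT".toList, "适度高配".toList),
   ("NEUTRAL".toList, "维持基线".toList),
   ("UNDERWEIGHT".toList, "适度低配".toList),
   ("YES".toList, "是".toList),
   ("NO".toList, "否".toList)]

-- Source B's inner `for source, target in replacements: if text.startswith(source, i)` loop
def pvFirstTok : List (List Char × List Char) → List Char → Option (List Char × List Char)
  | [], _ => none
  | t :: rest, s => if t.1.isPrefixOf s then some t else pvFirstTok rest s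

-- Source B's `while i < n` scan: emit the matched token's label (advancing by its length) or the character
def pvScan : List Char → List Char
  | [] => []
  | c :: cs =>
    match pvFirstTok pvReplacements (c :: cs) with
    | some t => t.2 ++ pvScan (cs.drop (t.1.length - 1))
    | none => c :: pvScan cs
termination_by s => s.length
decreasing_by
  · simp only [List.length_cons, List.length_drop]; omega
  · simp

def decision_path_label_alt (text : String) : String :=
  String.ofList (pvScan text.toList)

-- ===== PRECONDITION & SPEC =====
-- The 8 straddle patterns: an earlier-listed token starting inside a later-listed token's occurrence.
def pvBadPatterns : List String :=
  ["TACTICAL_REBALANCEXTREME_HEAT",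
   "STRONG_OVERWEIGHTACTICAL_REBALANCE",
   "STRONG_UNDERWEIGHTACTICAL_REBALANCE",
   "OVERWEIGHTACTICAL_REBALANCE",
   "UNDERWEIGHTACTICAL_REBALANCE",
   "YESTRONG_OVERWEIGHT",
   "YESTRONG_UNDERWEIGHT",
   "NOVERWEIGHT"]

-- Pre_ excludes texts containing one of the 8 substrings where an occurrence of an earlier-listed
-- token starts strictly inside an occurrence of a later-listed token: on such overlaps A's
-- sequential passes and B's positional scan make equally defensible, unspecified priority choices.
def Pre_decision_path_label (text : String) : Prop :=
  ∀ pat ∈ pvBadPatterns, PySem.Str.isIn pat text = false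
instance (text : String) : Decidable (Pre_decision_path_label text) := by
  unfold Pre_decision_path_label; infer_instance

def pvWitness_decision_path_label : String := "path: NORMAL, overheat=NO"

def Spec_decision_path_label (text : String) (out : String) : Prop := out = decision_path_label_alt text
instance (text : String) (out : String) : Decidable (Spec_decision_path_label text out) := by unfold Spec_decision_path_label; infer_instance

-- ===== CLAIM (what is proved, stated in full; the proofs are below) =====
def Claim_equal_decision_path_label : Prop := ∀ (text : String), Dom_decision_path_label text → Pre_decision_path_label text → Spec_decision_path_label text (decision_path_label text)

-- ===== LEMMAS AND PROOFS =====

-- all code points ASCII / all non-ASCII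
def pvAscii (l : List Char) : Bool := l.all (fun c => c.toNat < 128)
def pvBig (l : List Char) : Bool := l.all (fun c => 128 ≤ c.toNat)

-- clean recursion computing Python's str.replace (for a nonempty pattern)
def pvRepl (old new : List Char) : List Char → List Char
  | [] => []
  | c :: t =>
    if old.isPrefixOf (c :: t) then new ++ pvRepl old new (t.drop (old.length - 1))
    else c :: pvRepl old new t
termination_by l => l.length
decreasing_by
  · simp only [List.length_cons, List.length_drop]; omega
  · simp

def pvChain (L : List (List Char × List Char)) (s : List Char) : List Char :=
  L.foldl (fun acc t => pvRepl t.1 t.2 acc) s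

theorem pv_go_spec (old new : List Char) (hold : old ≠ []) :
    ∀ (fuel : Nat) (l acc : List Char), l.length ≤ fuel →
      PySem.Chars.replace.go old new fuel l acc = acc.reverse ++ pvRepl old new l := by
  intro fuel
  induction fuel with
  | zero =>
    intro l acc h
    have hl : l = [] := List.eq_nil_of_length_eq_zero (Nat.le_zero.mp h)
    subst hl
    simp [PySem.Chars.replace.go, pvRepl]
  | succ f ih =>
    intro l acc h
    cases l with
    | nil => simp [PySem.Chars.replace.go, pvRepl]
    | cons c t =>
      by_cases hp : old.isPrefixOf (c :: t)
      · obtain ⟨o, os, rfl⟩ : ∃ o os, old = o :: os := by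
          cases old with
          | nil => exact absurd rfl hold
          | cons o os => exact ⟨o, os, rfl⟩
        rw [PySem.Chars.replace.go]
        simp only [hp, if_true]
        rw [ih _ _ (by
          simp only [List.length_drop, List.length_cons] at *
          omega)]
        rw [pvRepl]
        simp only [hp, if_true]
        simp [List.drop_succ_cons, List.append_assoc]
      · rw [PySem.Chars.replace.go]
        simp only [hp, Bool.false_eq_true, if_false]
        rw [ih t (c :: acc) (by simp at h; omega)]
        rw [pvRepl]
        simp [hp]

theorem pv_replace_eq (s old new : List Char) (hold : old ≠ []) :
    PySem.Chars.replace s old new = pvRepl old new s := by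
  have he : old.isEmpty = false := by cases old <;> simp_all
  rw [PySem.Chars.replace]
  simp only [he, Bool.false_eq_true, if_false]
  simpa using pv_go_spec old new hold s.length s [] le_rfl

theorem pv_prefix_app_cases {p a b : List Char} (h : p <+: a ++ b) :
    p <+: a ∨ (a <+: p ∧ p.drop a.length <+: b) := by
  by_cases hl : p.length ≤ a.length
  · exact Or.inl (List.prefix_of_prefix_length_le h (List.prefix_append a b) hl)
  · have ha : a <+: p :=
      List.prefix_of_prefix_length_le (List.prefix_append a b) h (by omega)
    obtain ⟨w, rfl⟩ := ha
    refine Or.inr ⟨⟨w, rfl⟩, ?_⟩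
    obtain ⟨u, hu⟩ := h
    have hwu : w ++ u = b := by
      apply List.append_cancel_left (as := a)
      rw [← List.append_assoc, hu]
    rw [List.drop_left]
    exact ⟨u, hwu⟩

theorem pv_pullback {old new : List Char} (_hold : old ≠ []) (hnew : new ≠ []) (hb : pvBig new = true)
    {p : List Char} (hp : pvAscii p = true) :
    ∀ v : List Char, p <+: pvRepl old new v → p <+: v := by
  suffices H : ∀ (n : Nat) (v p : List Char), v.length ≤ n → pvAscii p = true →
      p <+: pvRepl old new v → p <+: v by
    intro v; exact H v.length v p le_rfl hp
  intro n
  induction n with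
  | zero =>
    intro v p hl _ h
    have hv : v = [] := List.eq_nil_of_length_eq_zero (Nat.le_zero.mp hl)
    subst hv
    simpa [pvRepl] using h
  | succ n ihn =>
    intro v p hl hpa h
    cases v with
    | nil => simpa [pvRepl] using h
    | cons c t =>
      by_cases hc : old.isPrefixOf (c :: t)
      · rw [pvRepl] at h
        simp only [hc, if_true] at h
        cases p with
        | nil => exact List.nil_prefix
        | cons a p' =>
          obtain ⟨n0, nt, rfl⟩ : ∃ n0 nt, new = n0 :: nt := by
            cases new with
            | nil => exact absurd rfl hnew
            | cons n0 nt => exact ⟨n0, nt, rfl⟩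
          rw [List.cons_append, List.cons_prefix_cons] at h
          obtain ⟨rfl, -⟩ := h
          have h1 : a.toNat < 128 := by simp [pvAscii] at hpa; exact hpa.1
          have h2 : 128 ≤ a.toNat := by simp [pvBig] at hb; exact hb.1
          omega
      · rw [pvRepl] at h
        simp only [hc, Bool.false_eq_true, if_false] at h
        cases p with
        | nil => exact List.nil_prefix
        | cons a p' =>
          rw [List.cons_prefix_cons] at h ⊢
          refine ⟨h.1, ihn t p' (by simp at hl; omega) ?_ h.2⟩
          simp [pvAscii] at hpa ⊢
          exact hpa.2

theorem pv_pullback_app {old new : List Char} (hold : old ≠ []) (hnew : new ≠ []) (hb : pvBig new = true)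
    {p a v : List Char} (hp : pvAscii p = true) (h : p <+: a ++ pvRepl old new v) :
    p <+: a ++ v := by
  rcases pv_prefix_app_cases h with h1 | ⟨h1, h2⟩
  · exact h1.trans (List.prefix_append a v)
  · obtain ⟨w, rfl⟩ := h1
    rw [List.drop_left] at h2
    have hw : pvAscii w = true := by
      simp [pvAscii, List.all_append] at hp
      simp [pvAscii]
      exact hp.2
    obtain ⟨u, hu⟩ := pv_pullback hold hnew hb hw v h2
    exact ⟨u, by rw [List.append_assoc, hu]⟩

theorem pv_repl_skip (old new : List Char) :
    ∀ (a v : List Char), (∀ p < a.length, ¬ old <+: a.drop p ++ v) →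
      pvRepl old new (a ++ v) = a ++ pvRepl old new v := by
  intro a
  induction a with
  | nil => intro v h; simp
  | cons c a' ih =>
    intro v h
    have h0 : ¬ old <+: (c :: a') ++ v := by simpa using h 0 (by simp)
    rw [List.cons_append, pvRepl]
    have hc : old.isPrefixOf (c :: (a' ++ v)) = false := by
      rw [Bool.eq_false_iff]
      intro hx
      exact h0 (by simpa [List.isPrefixOf_iff_prefix] using hx)
    simp only [hc, Bool.false_eq_true, if_false]
    rw [ih v (fun p hp => by
      have := h (p + 1) (by simp; omega)
      simpa [List.drop_succ_cons] using this)]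
    simp

theorem pv_repl_head (old new v : List Char) (hold : old ≠ []) :
    pvRepl old new (old ++ v) = new ++ pvRepl old new v := by
  obtain ⟨o, os, rfl⟩ : ∃ o os, old = o :: os := by
    cases old with
    | nil => exact absurd rfl hold
    | cons o os => exact ⟨o, os, rfl⟩
  rw [List.cons_append, pvRepl]
  have hc : (o :: os).isPrefixOf (o :: (os ++ v)) = true := by
    rw [List.isPrefixOf_iff_prefix, List.cons_prefix_cons]
    exact ⟨rfl, List.prefix_append os v⟩
  simp only [hc, if_true]
  simp

theorem pv_chain_nil (L : List (List Char × List Char)) : pvChain L [] = [] := by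
  induction L with
  | nil => rfl
  | cons t L ih => simpa [pvChain, pvRepl] using ih

theorem pv_chain_pre (L : List (List Char × List Char))
    (hf : ∀ t ∈ L, t.1 ≠ [] ∧ pvAscii t.1 = true ∧ t.2 ≠ [] ∧ pvBig t.2 = true)
    (a : List Char) :
    ∀ v : List Char, (∀ t ∈ L, ∀ p < a.length, ¬ t.1 <+: a.drop p ++ v) →
      pvChain L (a ++ v) = a ++ pvChain L v := by
  induction L with
  | nil => intro v _; simp [pvChain]
  | cons t L ih =>
    intro v hocc
    have hft := hf t List.mem_cons_self
    simp only [pvChain, List.foldl_cons]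
    rw [pv_repl_skip t.1 t.2 a v (fun p hp => hocc t List.mem_cons_self p hp)]
    exact ih (fun u hu => hf u (List.mem_cons_of_mem t hu)) (pvRepl t.1 t.2 v)
      (fun u hu p hp hpref =>
        hocc u (List.mem_cons_of_mem t hu) p hp
          (pv_pullback_app hft.1 hft.2.2.1 hft.2.2.2 (hf u (List.mem_cons_of_mem t hu)).2.1 hpref))

theorem pv_chain_post (L : List (List Char × List Char))
    (hf : ∀ t ∈ L, t.1 ≠ [] ∧ pvAscii t.1 = true)
    (a : List Char) (ha : pvBig a = true) :
    ∀ v : List Char, pvChain L (a ++ v) = a ++ pvChain L v := by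
  induction L with
  | nil => intro v; simp [pvChain]
  | cons t L ih =>
    intro v
    simp only [pvChain, List.foldl_cons]
    rw [pv_repl_skip t.1 t.2 a v ?_]
    · exact ih (fun u hu => hf u (List.mem_cons_of_mem t hu)) (pvRepl t.1 t.2 v)
    · intro p hp hpref
      have hft := hf t List.mem_cons_self
      obtain ⟨o, os, ho⟩ : ∃ o os, t.1 = o :: os := by
        cases hx : t.1 with
        | nil => exact absurd hx hft.1
        | cons o os => exact ⟨o, os, rfl⟩
      rw [ho, List.drop_eq_getElem_cons hp, List.cons_append, List.cons_prefix_cons] at hpref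
      obtain ⟨hoeq, -⟩ := hpref
      have h1 : o.toNat < 128 := by
        have := hft.2
        rw [ho] at this
        simp [pvAscii] at this
        exact this.1
      have h2 : 128 ≤ (a[p]).toNat := by
        simp only [pvBig, List.all_eq_true] at ha
        simpa using ha (a[p]) (a.getElem_mem hp)
      rw [hoeq] at h1
      omega

theorem pv_ft_none {L : List (List Char × List Char)} {s : List Char}
    (h : pvFirstTok L s = none) : ∀ t ∈ L, ¬ t.1 <+: s := by
  induction L with
  | nil => intro t ht; simp at ht
  | cons u rest ih =>
    by_cases hp : u.1.isPrefixOf s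
    · rw [pvFirstTok] at h; simp [hp] at h
    · rw [pvFirstTok] at h
      simp only [hp, Bool.false_eq_true, if_false] at h
      intro t ht
      rcases List.mem_cons.mp ht with rfl | ht'
      · intro hx
        exact hp (by simpa [List.isPrefixOf_iff_prefix] using hx)
      · exact ih h t ht' 

theorem pv_ft_some {L : List (List Char × List Char)} {s : List Char} {x : List Char × List Char}
    (h : pvFirstTok L s = some x) :
    ∃ L1 L2, L = L1 ++ x :: L2 ∧ (∀ t ∈ L1, ¬ t.1 <+: s) ∧ x.1 <+: s := by
  induction L with
  | nil => rw [pvFirstTok] at h; simp at h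
  | cons u rest ih =>
    by_cases hp : u.1.isPrefixOf s
    · rw [pvFirstTok] at h
      simp only [hp, if_true, Option.some.injEq] at h
      subst h
      exact ⟨[], rest, rfl, by simp, List.isPrefixOf_iff_prefix.mp hp⟩
    · rw [pvFirstTok] at h
      simp only [hp, Bool.false_eq_true, if_false] at h
      obtain ⟨L1, L2, hLeq, hL1, hx⟩ := ih h
      refine ⟨u :: L1, L2, by rw [hLeq, List.cons_append], ?_, hx⟩
      intro t ht
      rcases List.mem_cons.mp ht with rfl | ht'
      · intro hxx
        exact hp (by simpa [List.isPrefixOf_iff_prefix] using hxx)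
      · exact hL1 t ht' 

def pvBadPats : List (List Char) := pvBadPatterns.map String.toList

-- the finite overlap check: for an earlier token t and a later token u, any position strictly
-- inside u.1 either clashes with t.1 or realises one of the 8 bad patterns
def pvOverlapOK : List (List Char × List Char) → Bool
  | [] => true
  | t :: rest =>
    (rest.all fun u =>
      (List.range u.1.length).all fun p =>
        (p == 0) || (((!(t.1.isPrefixOf (u.1.drop p))) && (!((u.1.drop p).isPrefixOf t.1))) ||
          pvBadPats.any (fun pat => pat == u.1.take p ++ t.1))) &&
    pvOverlapOK rest

theorem pv_overlap_fact : pvOverlapOK pvReplacements = true := by decide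

theorem pv_overlap_spec :
    ∀ (L L1 L2 : List (List Char × List Char)) (x : List Char × List Char),
      pvOverlapOK L = true → L = L1 ++ x :: L2 →
      ∀ t ∈ L1, ∀ p : Nat, 0 < p → p < x.1.length →
        (¬ t.1 <+: x.1.drop p ∧ ¬ x.1.drop p <+: t.1) ∨ (x.1.take p ++ t.1) ∈ pvBadPats := by
  intro L
  induction L with
  | nil =>
    intro L1 L2 x _ heq
    cases L1 <;> simp at heq
  | cons t0 rest ih =>
    intro L1 L2 x hOK heq
    rw [pvOverlapOK, Bool.and_eq_true] at hOK
    cases L1 with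
    | nil =>
      intro t ht; simp at ht
    | cons t1 L1' =>
      rw [List.cons_append, List.cons.injEq] at heq
      obtain ⟨rfl, hrest⟩ := heq
      intro t ht p hp hplen
      rcases List.mem_cons.mp ht with rfl | ht'
      · have hxmem : x ∈ rest := by
          rw [hrest]; exact List.mem_append_right _ List.mem_cons_self
        have hclause := (List.all_eq_true.mp hOK.1) x hxmem
        have hpcl := (List.all_eq_true.mp hclause) p (List.mem_range.mpr hplen)
        rcases Bool.or_eq_true_iff.mp hpcl with h0 | hrest2
        · rw [beq_iff_eq] at h0; omega
        · rcases Bool.or_eq_true_iff.mp hrest2 with hmid | hany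
          · rw [Bool.and_eq_true, Bool.not_eq_true', Bool.not_eq_true'] at hmid
            left
            constructor
            · intro hx
              rw [← List.isPrefixOf_iff_prefix] at hx
              rw [hmid.1] at hx
              exact Bool.false_ne_true hx
            · intro hx
              rw [← List.isPrefixOf_iff_prefix] at hx
              rw [hmid.2] at hx
              exact Bool.false_ne_true hx
          · right
            obtain ⟨pat, hpat, hpeq⟩ := List.any_eq_true.mp hany
            rw [beq_iff_eq] at hpeq
            rw [← hpeq]
            exact hpat
      · exact ih L1' L2 x hOK.2 hrest t ht' p hp hplen

theorem pv_toks_ok :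
    ∀ t ∈ pvReplacements, t.1 ≠ [] ∧ pvAscii t.1 = true ∧ t.2 ≠ [] ∧ pvBig t.2 = true := by decide

def pvNoBad (s : List Char) : Prop := ∀ pat ∈ pvBadPats, ¬ pat <:+: s

theorem pv_main : ∀ (n : Nat) (s : List Char), s.length ≤ n → pvAscii s = true → pvNoBad s →
    pvChain pvReplacements s = pvScan s := by
  intro n
  induction n with
  | zero =>
    intro s h _ _
    have : s = [] := List.eq_nil_of_length_eq_zero (Nat.le_zero.mp h)
    subst this
    rw [pv_chain_nil, pvScan]
  | succ n ih =>
    intro s hlen hascii hbad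
    cases s with
    | nil => rw [pv_chain_nil, pvScan]
    | cons c t =>
      cases hft : pvFirstTok pvReplacements (c :: t) with
      | none =>
        have hocc := pv_ft_none hft
        have hocc' : ∀ u ∈ pvReplacements, ∀ p < ([c] : List Char).length,
            ¬ u.1 <+: ([c] : List Char).drop p ++ t := by
          intro u hu p hp
          have hp0 : p = 0 := by simp at hp; omega
          subst hp0
          simpa using hocc u hu
        have h1 := pv_chain_pre pvReplacements pv_toks_ok [c] t hocc'
        have escan : pvScan (c :: t) = c :: pvScan t := by rw [pvScan, hft]
        rw [escan]
        simp only [List.singleton_append] at h1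
        rw [h1]
        have htail : pvAscii t = true := by
          simp [pvAscii] at hascii ⊢; exact hascii.2
        have hbt : pvNoBad t := fun pat hpat hinf =>
          hbad pat hpat (hinf.trans (List.suffix_cons c t).isInfix)
        rw [ih t (by simpa using hlen) htail hbt]
      | some x =>
        obtain ⟨L1, L2, hLeq, hL1, hpre⟩ := pv_ft_some hft
        obtain ⟨rest, hrest⟩ := hpre
        have hxmem : x ∈ pvReplacements := by
          rw [hLeq]; exact List.mem_append_right _ List.mem_cons_self
        have hxf := pv_toks_ok x hxmem
        have hL1f : ∀ u ∈ L1, u.1 ≠ [] ∧ pvAscii u.1 = true ∧ u.2 ≠ [] ∧ pvBig u.2 = true :=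
          fun u hu => pv_toks_ok u (by rw [hLeq]; exact List.mem_append_left _ hu)
        have hL2f : ∀ u ∈ L2, u.1 ≠ [] ∧ pvAscii u.1 = true :=
          fun u hu => ⟨(pv_toks_ok u (by
            rw [hLeq]; exact List.mem_append_right _ (List.mem_cons_of_mem x hu))).1,
            (pv_toks_ok u (by
            rw [hLeq]; exact List.mem_append_right _ (List.mem_cons_of_mem x hu))).2.1⟩
        have hocc : ∀ u ∈ L1, ∀ p < x.1.length, ¬ u.1 <+: x.1.drop p ++ rest := by
          intro u hu p hp hpref
          rcases Nat.eq_zero_or_pos p with rfl | hpos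
          · rw [List.drop_zero, hrest] at hpref
            exact hL1 u hu hpref
          · rcases pv_overlap_spec pvReplacements L1 L2 x pv_overlap_fact hLeq
                u hu p hpos hp with ⟨hA, hB⟩ | hpat
            · rcases pv_prefix_app_cases hpref with h | ⟨h, -⟩
              · exact hA h
              · exact hB h
            · apply hbad _ hpat
              have hx1 : x.1.take p ++ u.1 <+: x.1.take p ++ (x.1.drop p ++ rest) := by
                obtain ⟨w, hw⟩ := hpref
                exact ⟨w, by rw [List.append_assoc, hw]⟩
              rw [← List.append_assoc, List.take_append_drop, hrest] at hx1
              exact hx1.isInfix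
        have e1 : pvChain pvReplacements (c :: t)
            = pvChain L2 (pvRepl x.1 x.2 (pvChain L1 (c :: t))) := by
          rw [hLeq]; simp [pvChain, List.foldl_append]
        have e2 : pvChain L1 (c :: t) = x.1 ++ pvChain L1 rest := by
          rw [← hrest]
          exact pv_chain_pre L1 hL1f x.1 rest hocc
        have e3 : pvRepl x.1 x.2 (x.1 ++ pvChain L1 rest)
            = x.2 ++ pvRepl x.1 x.2 (pvChain L1 rest) :=
          pv_repl_head x.1 x.2 _ hxf.1
        have e4 : pvChain L2 (x.2 ++ pvRepl x.1 x.2 (pvChain L1 rest))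
            = x.2 ++ pvChain L2 (pvRepl x.1 x.2 (pvChain L1 rest)) :=
          pv_chain_post L2 hL2f x.2 hxf.2.2.2 _
        have e5 : pvChain L2 (pvRepl x.1 x.2 (pvChain L1 rest))
            = pvChain pvReplacements rest := by
          rw [hLeq]; simp [pvChain, List.foldl_append]
        obtain ⟨x0, xs, hx1⟩ : ∃ x0 xs, x.1 = x0 :: xs := by
          cases hx : x.1 with
          | nil => exact absurd hx hxf.1
          | cons x0 xs => exact ⟨x0, xs, rfl⟩
        have ht : t = xs ++ rest := by
          rw [hx1, List.cons_append, List.cons.injEq] at hrest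
          exact hrest.2.symm
        have hdrop : t.drop (x.1.length - 1) = rest := by
          rw [ht, hx1]
          simp
        have escan : pvScan (c :: t) = x.2 ++ pvScan (t.drop (x.1.length - 1)) := by
          rw [pvScan, hft]
        have hrl : rest.length ≤ n := by
          have := congrArg List.length hrest
          simp [hx1] at this ⊢
          simp at hlen
          omega
        have hra : pvAscii rest = true := by
          have hh : pvAscii (c :: t) = pvAscii (x.1 ++ rest) := by rw [hrest]
          rw [hh] at hascii
          simp [pvAscii, List.all_append] at hascii
          simp [pvAscii]
          exact hascii.2
        have hrb : pvNoBad rest := by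
          intro pat hpat hinf
          exact hbad pat hpat (hinf.trans (by
            rw [← hrest]; exact (List.suffix_append x.1 rest).isInfix))
        rw [escan, hdrop, e1, e2, e3, e4, e5, ih rest hrl hra hrb]

theorem pv_portA (text : String) :
    (decision_path_label text).toList = pvChain pvReplacements text.toList := by
  have gen : ∀ (L : List (String × String)) (t : String), (∀ p ∈ L, p.1.toList ≠ []) →
      (L.foldl (fun r st => PySem.Str.replace r st.1 st.2) t).toList
        = pvChain (L.map (fun p => (p.1.toList, p.2.toList))) t.toList := by
    intro L
    induction L with
    | nil => intro t _; simp [pvChain]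
    | cons p L ih =>
      intro t hne
      simp only [List.foldl_cons, List.map_cons, pvChain, List.foldl_cons]
      rw [ih (PySem.Str.replace t p.1 p.2) (fun q hq => hne q (List.mem_cons_of_mem p hq))]
      simp only [pvChain]
      congr 1
      rw [PySem.Str.toList_replace]
      exact pv_replace_eq t.toList p.1.toList p.2.toList (hne p List.mem_cons_self)
  rw [decision_path_label, gen _ text (by decide)]
  rfl

-- ===== VERDICT (by name: the statement is the Claim_ definition above) =====
theorem decision_path_label_spec : Claim_equal_decision_path_label := by
  unfold Claim_equal_decision_path_label
  intro text hdom hpre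
  unfold Spec_decision_path_label decision_path_label_alt
  have hascii : pvAscii text.toList = true := by
    unfold Dom_decision_path_label pvDomStr at hdom
    simp only [pvAscii, List.all_eq_true] at *
    intro c hc
    have := hdom c hc
    simp [pvDomChar] at this
    simp
    omega
  have hbad : pvNoBad text.toList := by
    intro pat hpat hinf
    simp only [pvBadPats, List.mem_map] at hpat
    obtain ⟨ps, hps, rfl⟩ := hpat
    have := hpre ps hps
    rw [← PySem.Str.isIn_iff_infix] at hinf
    rw [this] at hinf
    exact Bool.false_ne_true hinf
  have h1 : (decision_path_label text).toList = pvScan text.toList := by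
    rw [pv_portA, pv_main text.toList.length text.toList le_rfl hascii hbad]
  rw [← h1, String.ofList_toList]
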